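-- pv_equiv track=rewrite | github.com/JankowskiDaniel/evolutionary-computation | assignment10/steepest.py | find_common_edges
-- ===== SOURCE A (Python) =====
-- def find_common_edges(path1: list[int], path2: list[int], n: int = 100) -> set[tuple[int, int]]:
--     edges1 = []
--     edges2 = []
--     for i in range(n):
--         edges1.append((path1[i], path1[(i+1)%n]))
--         edges2.append((path2[i], path2[(i+1)%n]))
--         edges2.append((path2[(i+1)%n], path2[i]))
--     e1_set = set(edges1)
--     e2_set = set(edges2)
--     return e1_set.intersection(e2_set)
-- ===== SOURCE B (Python) =====
-- def find_common_edges(path1: list[int], path2: list[int], n: int = 100) -> set[tuple[int, int]]: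
--     # Index-free direct scan: for each consecutive pair of path1, scan path2's
--     # consecutive pairs for a match in either direction (no edge sets, no intersection).
--     common = set()
--     for i in range(n):
--         a, b = path1[i], path1[(i + 1) % n]
--         if any((a, b) in ((path2[j], path2[(j + 1) % n]), (path2[(j + 1) % n], path2[j]))
--                for j in range(n)):
--             common.add((a, b))
--     return common
-- ===== Notes on version B (the rewrite author's own statement) =====
-- stated objective: simpler
-- what changed: B drops A's two edge lists, the two sets and the set-intersection entirely: a single loop over path1's consecutive pairs with a direct short-circuit scan of path2's pairs (either direction), at the cost of a quadratic worst case.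
import Mathlib
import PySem

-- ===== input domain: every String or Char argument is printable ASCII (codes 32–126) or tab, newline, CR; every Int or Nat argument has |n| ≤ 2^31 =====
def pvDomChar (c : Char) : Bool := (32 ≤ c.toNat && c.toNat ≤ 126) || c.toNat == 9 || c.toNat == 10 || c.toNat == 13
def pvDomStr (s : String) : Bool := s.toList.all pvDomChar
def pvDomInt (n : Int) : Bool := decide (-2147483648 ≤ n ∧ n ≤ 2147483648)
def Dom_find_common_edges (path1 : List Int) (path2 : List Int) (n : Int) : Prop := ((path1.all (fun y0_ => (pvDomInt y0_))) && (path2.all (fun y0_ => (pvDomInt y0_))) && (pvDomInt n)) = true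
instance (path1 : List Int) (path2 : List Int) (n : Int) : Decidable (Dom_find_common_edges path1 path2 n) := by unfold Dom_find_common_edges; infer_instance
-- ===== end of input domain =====

-- B drops A's edge lists, sets and intersection for a single loop over path1's pairs
-- with a direct short-circuit scan of path2's pairs (simpler code, quadratic worst case).

-- ===== PORT A =====
def find_common_edges (path1 : List Int) (path2 : List Int) (n : Int) : List (Int × Int) :=
  -- for i in range(n): edges1.append(...); edges2.append(...); edges2.append(...)
  let st := (PySem.List.pyRange 0 n 1).foldl
    (fun (st : List (Int × Int) × List (Int × Int)) i =>
      (st.1 ++ [(PySem.List.pyGetD path1 i 0, PySem.List.pyGetD path1 (PySem.Int.mod (i+1) n) 0)],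
       st.2 ++ [(PySem.List.pyGetD path2 i 0, PySem.List.pyGetD path2 (PySem.Int.mod (i+1) n) 0)]
            ++ [(PySem.List.pyGetD path2 (PySem.Int.mod (i+1) n) 0, PySem.List.pyGetD path2 i 0)]))
    ([], [])
  PySem.Set.inter (PySem.Set.ofList st.1) (PySem.Set.ofList st.2)

-- ===== PORT B =====
def find_common_edges_alt (path1 : List Int) (path2 : List Int) (n : Int) : List (Int × Int) :=
  -- one loop over path1's pairs; inner any() short-circuit scan of path2's pairs
  (PySem.List.pyRange 0 n 1).foldl
    (fun (common : PySem.Set (Int × Int)) i =>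
      let a := PySem.List.pyGetD path1 i 0
      let b := PySem.List.pyGetD path1 (PySem.Int.mod (i+1) n) 0
      if (PySem.List.pyRange 0 n 1).any (fun j =>
           let c := PySem.List.pyGetD path2 j 0
           let d := PySem.List.pyGetD path2 (PySem.Int.mod (j+1) n) 0
           ((a, b) == (c, d)) || ((a, b) == (d, c)))
      then PySem.Set.add common (a, b) else common)
    PySem.Set.empty

-- ===== PRECONDITION & SPEC =====
-- Pre_ excludes only the inputs where the Python raises IndexError: 0 < n and some index in range(n) out of range.
def Pre_find_common_edges (path1 : List Int) (path2 : List Int) (n : Int) : Prop :=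
  0 < n → (n ≤ (path1.length : Int) ∧ n ≤ (path2.length : Int))
instance (path1 : List Int) (path2 : List Int) (n : Int) : Decidable (Pre_find_common_edges path1 path2 n) := by unfold Pre_find_common_edges; infer_instance
def pvWitness_find_common_edges : List Int × List Int × Int := ([1, 2, 3], [2, 1, 3], 3)

def Spec_find_common_edges (path1 : List Int) (path2 : List Int) (n : Int) (out : List (Int × Int)) : Prop := out = find_common_edges_alt path1 path2 n
instance (path1 : List Int) (path2 : List Int) (n : Int) (out : List (Int × Int)) : Decidable (Spec_find_common_edges path1 path2 n out) := by unfold Spec_find_common_edges; infer_instance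

-- ===== CLAIM (what is proved, stated in full; the proofs are below) =====
def Claim_equal_find_common_edges : Prop := ∀ (path1 : List Int) (path2 : List Int) (n : Int), Dom_find_common_edges path1 path2 n → Pre_find_common_edges path1 path2 n → Spec_find_common_edges path1 path2 n (find_common_edges path1 path2 n)

-- ===== LEMMAS AND PROOFS =====

-- A's single loop building two lists splits into two flatMaps.
lemma pv_foldl_pair_append {α β : Type} (l : List α) (u v : α → List β) (a b : List β) :
    l.foldl (fun st i => (st.1 ++ u i, st.2 ++ v i)) (a, b) = (a ++ l.flatMap u, b ++ l.flatMap v) := by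
  induction l generalizing a b with
  | nil => simp
  | cons h t ih => simp [ih]

-- B's loop is update with a filter
lemma pv_foldl_add_if {α β : Type} [BEq α] (q : α → Bool) (p : β → α) (xs : List β) (s : PySem.Set α) :
    xs.foldl (fun r i => if q (p i) then PySem.Set.add r (p i) else r) s
      = PySem.Set.update s ((xs.map p).filter q) := by
  induction xs generalizing s with
  | nil => rfl
  | cons h t ih =>
    rw [List.foldl_cons, List.map_cons, List.filter_cons]
    by_cases hq : q (p h) <;> simp [hq, ih, PySem.Set.update_cons]

-- dedup (set building) commutes with filtering
lemma pv_filter_ofList {α : Type} [BEq α] [LawfulBEq α] (q : α → Bool) (xs : List α) :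
    (PySem.Set.ofList xs).filter q = PySem.Set.ofList (xs.filter q) := by
  induction xs using List.reverseRecOn with
  | nil => rfl
  | append_singleton t z ih =>
    rw [PySem.Set.ofList_append_singleton, List.filter_append, List.filter_cons]
    by_cases hq : q z
    · simp only [hq, if_pos, List.filter_nil]
      rw [PySem.Set.ofList_append_singleton]
      by_cases hz : z ∈ PySem.Set.ofList t
      · rw [PySem.Set.add_of_mem hz, ih, PySem.Set.add_of_mem]
        rw [PySem.Set.mem_ofList] at hz ⊢
        exact List.mem_filter.mpr ⟨hz, hq⟩
      · rw [PySem.Set.add_of_not_mem hz, List.filter_append, ih, List.filter_cons,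
          if_pos hq, List.filter_nil, PySem.Set.add_of_not_mem]
        rw [PySem.Set.mem_ofList] at hz ⊢
        intro hmem
        exact hz (List.mem_filter.mp hmem).1
    · simp only [hq, List.filter_nil, List.append_nil, Bool.false_eq_true, if_false]
      by_cases hz : z ∈ PySem.Set.ofList t
      · rw [PySem.Set.add_of_mem hz, ih]
      · rw [PySem.Set.add_of_not_mem hz, List.filter_append, List.filter_cons,
          if_neg hq, List.filter_nil, List.append_nil, ih]

-- ===== VERDICT (by name: the statement is the Claim_ definition above) =====
theorem find_common_edges_spec : Claim_equal_find_common_edges := by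
  intro path1 path2 n _ _
  unfold Spec_find_common_edges find_common_edges find_common_edges_alt
  set l := PySem.List.pyRange 0 n 1 with hl
  set p : Int → Int × Int := fun i =>
    (PySem.List.pyGetD path1 i 0, PySem.List.pyGetD path1 (PySem.Int.mod (i+1) n) 0) with hp
  set x : Int → Int := fun i => PySem.List.pyGetD path2 i 0 with hx
  set y : Int → Int := fun i => PySem.List.pyGetD path2 (PySem.Int.mod (i+1) n) 0 with hy
  -- A's loop
  rw [show (fun (st : List (Int × Int) × List (Int × Int)) (i : Int) =>
      (st.1 ++ [(PySem.List.pyGetD path1 i 0, PySem.List.pyGetD path1 (PySem.Int.mod (i+1) n) 0)],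
       st.2 ++ [(PySem.List.pyGetD path2 i 0, PySem.List.pyGetD path2 (PySem.Int.mod (i+1) n) 0)]
            ++ [(PySem.List.pyGetD path2 (PySem.Int.mod (i+1) n) 0, PySem.List.pyGetD path2 i 0)]))
    = (fun (st : List (Int × Int) × List (Int × Int)) (i : Int) =>
      (st.1 ++ (fun i => [p i]) i, st.2 ++ (fun i => [(x i, y i), (y i, x i)]) i)) from by
        funext st i
        simp [hp, hx, hy],
    pv_foldl_pair_append]
  simp only [List.nil_append]
  -- B's loop, as a filter by the inner scan q
  set q : Int × Int → Bool := fun e => l.any (fun j => (e == (x j, y j)) || (e == (y j, x j))) with hq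
  have hB : (l.foldl (fun (common : PySem.Set (Int × Int)) i =>
      if l.any (fun j =>
          ((PySem.List.pyGetD path1 i 0, PySem.List.pyGetD path1 (PySem.Int.mod (i+1) n) 0)
              == (PySem.List.pyGetD path2 j 0, PySem.List.pyGetD path2 (PySem.Int.mod (j+1) n) 0))
          || ((PySem.List.pyGetD path1 i 0, PySem.List.pyGetD path1 (PySem.Int.mod (i+1) n) 0)
              == (PySem.List.pyGetD path2 (PySem.Int.mod (j+1) n) 0, PySem.List.pyGetD path2 j 0)))
      then PySem.Set.add common (PySem.List.pyGetD path1 i 0, PySem.List.pyGetD path1 (PySem.Int.mod (i+1) n) 0) else common)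
      PySem.Set.empty)
      = PySem.Set.ofList ((l.map p).filter q) := by
    rw [show (fun (common : PySem.Set (Int × Int)) (i : Int) =>
        if l.any (fun j =>
            ((PySem.List.pyGetD path1 i 0, PySem.List.pyGetD path1 (PySem.Int.mod (i+1) n) 0)
                == (PySem.List.pyGetD path2 j 0, PySem.List.pyGetD path2 (PySem.Int.mod (j+1) n) 0))
            || ((PySem.List.pyGetD path1 i 0, PySem.List.pyGetD path1 (PySem.Int.mod (i+1) n) 0)
                == (PySem.List.pyGetD path2 (PySem.Int.mod (j+1) n) 0, PySem.List.pyGetD path2 j 0)))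
        then PySem.Set.add common (PySem.List.pyGetD path1 i 0, PySem.List.pyGetD path1 (PySem.Int.mod (i+1) n) 0) else common)
      = (fun (common : PySem.Set (Int × Int)) (i : Int) =>
        if q (p i) then PySem.Set.add common (p i) else common) from by
        funext common i
        simp [hq, hp, hx, hy]]
    rw [pv_foldl_add_if]
    rfl
  rw [hB]
  -- A's intersection is the same filter
  have hflat : l.flatMap (fun i => [p i]) = l.map p := by
    induction l with
    | nil => rfl
    | cons h t ih => simp only [List.flatMap_cons, List.map_cons, ih, List.singleton_append]
  rw [hflat]
  show PySem.Set.inter (PySem.Set.ofList (l.map p))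
      (PySem.Set.ofList (l.flatMap fun i => [(x i, y i), (y i, x i)])) = _
  rw [show PySem.Set.inter (PySem.Set.ofList (l.map p))
      (PySem.Set.ofList (l.flatMap fun i => [(x i, y i), (y i, x i)]))
    = (PySem.Set.ofList (l.map p)).filter
        (fun e => PySem.Set.contains (PySem.Set.ofList (l.flatMap fun i => [(x i, y i), (y i, x i)])) e) from rfl]
  rw [pv_filter_ofList]
  congr 1
  apply List.filter_congr
  intro e _
  rw [Bool.eq_iff_iff]
  simp only [PySem.Set.contains_iff, PySem.Set.mem_ofList, List.mem_flatMap,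
    List.mem_cons, List.not_mem_nil, or_false, hq, List.any_eq_true, beq_iff_eq,
    Bool.or_eq_true, Prod.ext_iff]
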